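-- pv_equiv track=rewrite | github.com/MaximeSahuc/deezer-dl | src/deezer/downloader.py | _get_preferred_audio_quality
-- ===== SOURCE A (Python) =====
-- def _get_preferred_audio_quality(preferred__audio_quality: str) -> list[dict]:
--     all_qualities = [
--         {"cipher": "BF_CBC_STRIPE", "format": "FLAC"},
--         {"cipher": "BF_CBC_STRIPE", "format": "MP3_320"},
--         {"cipher": "BF_CBC_STRIPE", "format": "MP3_128"},
--         {"cipher": "BF_CBC_STRIPE", "format": "MP3_64"},
--         {"cipher": "BF_CBC_STRIPE", "format": "MP3_MISC"},
--     ]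
--
--     preferred_qualities = []
--     found_selected = False
--
--     for quality in all_qualities:
--         if quality["format"] == preferred__audio_quality:
--             found_selected = True
--         if found_selected:
--             preferred_qualities.append(quality)
--
--     return preferred_qualities
-- ===== SOURCE B (Python) =====
-- def _get_preferred_audio_quality(preferred__audio_quality: str) -> list[dict]:
--     formats = ["FLAC", "MP3_320", "MP3_128", "MP3_64", "MP3_MISC"]
--     if preferred__audio_quality not in formats:
--         return []
--     i = formats.index(preferred__audio_quality)
--     return [{"cipher": "BF_CBC_STRIPE", "format": f} for f in formats[i:]]
-- ===== Notes on version B (the rewrite author's own statement) =====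
-- stated objective: simpler
-- what changed: B locates the preferred format's index in a plain list of format names and returns the contiguous tail slice mapped to quality dicts, replacing A's found-flag accumulation loop.
import Mathlib
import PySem

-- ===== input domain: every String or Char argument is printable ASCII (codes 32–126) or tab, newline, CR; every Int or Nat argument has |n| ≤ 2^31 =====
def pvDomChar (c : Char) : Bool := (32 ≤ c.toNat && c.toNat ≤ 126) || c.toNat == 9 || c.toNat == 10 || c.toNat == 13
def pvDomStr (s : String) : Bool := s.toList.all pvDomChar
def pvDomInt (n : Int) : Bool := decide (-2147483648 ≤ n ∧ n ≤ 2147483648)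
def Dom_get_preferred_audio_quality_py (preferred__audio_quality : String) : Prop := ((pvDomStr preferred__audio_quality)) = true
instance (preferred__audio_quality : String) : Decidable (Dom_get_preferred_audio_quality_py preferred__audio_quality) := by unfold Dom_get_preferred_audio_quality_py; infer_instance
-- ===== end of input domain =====

-- B replaces A's found-flag accumulation loop by locating the preferred format's index and slicing the tail (objective: simpler).


-- ===== PORT A =====
def pvAllQualities : List (List (String × String)) :=
  [ [("cipher", "BF_CBC_STRIPE"), ("format", "FLAC")],
    [("cipher", "BF_CBC_STRIPE"), ("format", "MP3_320")],
    [("cipher", "BF_CBC_STRIPE"), ("format", "MP3_128")],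
    [("cipher", "BF_CBC_STRIPE"), ("format", "MP3_64")],
    [("cipher", "BF_CBC_STRIPE"), ("format", "MP3_MISC")] ]

def get_preferred_audio_quality_py (preferred__audio_quality : String) : List (List (String × String)) :=
  -- for quality in all_qualities: set the flag on a format match, append while the flag holds
  let r := pvAllQualities.foldl
    (fun (st : List (List (String × String)) × Bool) quality =>
      -- quality["format"] is a first-match association-list lookup; the key is always present, "" is never used
      let found := if (List.lookup "format" quality).getD "" = preferred__audio_quality then true else st.2
      if found then (st.1 ++ [quality], found) else (st.1, found))
    ([], false)
  r.1

-- ===== PORT B =====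
def pvFormats : List String := ["FLAC", "MP3_320", "MP3_128", "MP3_64", "MP3_MISC"]

def get_preferred_audio_quality_py_alt (preferred__audio_quality : String) : List (List (String × String)) :=
  match PySem.List.index? pvFormats preferred__audio_quality with
  | none => []
  | some i =>
      (PySem.List.slice pvFormats (some (i : Int)) none).map
        (fun f => [("cipher", "BF_CBC_STRIPE"), ("format", f)])

-- ===== PRECONDITION & SPEC =====
def Spec_get_preferred_audio_quality_py (preferred__audio_quality : String) (out : List (List (String × String))) : Prop := out = get_preferred_audio_quality_py_alt preferred__audio_quality
instance (preferred__audio_quality : String) (out : List (List (String × String))) : Decidable (Spec_get_preferred_audio_quality_py preferred__audio_quality out) := by unfold Spec_get_preferred_audio_quality_py; infer_instance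

-- ===== CLAIM (what is proved, stated in full; the proofs are below) =====
def Claim_equal_get_preferred_audio_quality_py : Prop := ∀ (preferred__audio_quality : String), Dom_get_preferred_audio_quality_py preferred__audio_quality → Spec_get_preferred_audio_quality_py preferred__audio_quality (get_preferred_audio_quality_py preferred__audio_quality)

-- ===== LEMMAS AND PROOFS =====
theorem pv_eq_of_not_mem (p : String)
    (h1 : p ≠ "FLAC") (h2 : p ≠ "MP3_320") (h3 : p ≠ "MP3_128")
    (h4 : p ≠ "MP3_64") (h5 : p ≠ "MP3_MISC") :
    get_preferred_audio_quality_py p = get_preferred_audio_quality_py_alt p := by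
  have hnone : List.idxOf? p pvFormats = none := by
    simp [List.idxOf?_eq_none_iff, pvFormats, h1, h2, h3, h4, h5]
  simp [get_preferred_audio_quality_py, get_preferred_audio_quality_py_alt,
        pvAllQualities, List.lookup, hnone,
        Ne.symm h1, Ne.symm h2, Ne.symm h3, Ne.symm h4, Ne.symm h5]

-- ===== VERDICT (by name: the statement is the Claim_ definition above) =====
theorem get_preferred_audio_quality_py_spec : Claim_equal_get_preferred_audio_quality_py := by
  intro p _
  unfold Spec_get_preferred_audio_quality_py
  by_cases h1 : p = "FLAC"; · subst h1; decide
  by_cases h2 : p = "MP3_320"; · subst h2; decide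
  by_cases h3 : p = "MP3_128"; · subst h3; decide
  by_cases h4 : p = "MP3_64"; · subst h4; decide
  by_cases h5 : p = "MP3_MISC"; · subst h5; decide
  exact pv_eq_of_not_mem p h1 h2 h3 h4 h5
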